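-- pv_equiv track=rewrite | github.com/AlexGidman/AoC-2020 | Day11/Day11.py | check_above
-- ===== SOURCE A (Python) =====
-- def check_above(row, column, seating, width, height) -> int:
--     if row == 0:
--         return 0
--     if seating[row-1][column] == '#':
--         return 1
--     if seating[row-1][column] == 'L':
--         return 0
--     row -= 1
--     return check_above(row, column, seating, width, height)
-- ===== SOURCE B (Python) =====
-- def check_above(row, column, seating, width, height) -> int:
--     for r in range(row - 1, -1, -1):
--         seat = seating[r][column]
--         if seat == '#':
--             return 1
--         if seat == 'L':
--             return 0
--     return 0
-- ===== Notes on version B (the rewrite author's own statement) =====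
-- stated objective: idiomatic
-- what changed: Replaces the tail recursion with an explicit downward for-loop over range(row-1, -1, -1) with early returns; the empty range covers the row==0 base case.
-- outside the precondition, e.g. on check_above(-1, 0, ['#', '#'], 2, 2): A returns 1, B returns 0
import Mathlib
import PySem

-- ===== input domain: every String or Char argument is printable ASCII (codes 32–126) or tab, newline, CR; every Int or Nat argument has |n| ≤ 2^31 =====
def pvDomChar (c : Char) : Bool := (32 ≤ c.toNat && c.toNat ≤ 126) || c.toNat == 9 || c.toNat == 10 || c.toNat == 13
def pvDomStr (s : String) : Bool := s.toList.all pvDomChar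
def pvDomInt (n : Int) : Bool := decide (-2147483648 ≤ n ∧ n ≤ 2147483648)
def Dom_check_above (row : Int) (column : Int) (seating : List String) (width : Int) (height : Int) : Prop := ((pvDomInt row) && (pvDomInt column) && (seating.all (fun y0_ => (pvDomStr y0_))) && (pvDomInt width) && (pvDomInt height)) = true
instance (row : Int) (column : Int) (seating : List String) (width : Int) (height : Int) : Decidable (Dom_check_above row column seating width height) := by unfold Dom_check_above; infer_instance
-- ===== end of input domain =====

-- B replaces A's tail recursion by an explicit downward loop over range(row-1, -1, -1); same scan order, no speed claim.

-- ===== PORT A =====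
-- Literal port of the recursion.  The `row < 0` guard only makes the function total:
-- Python recurses without bound (or wraps around via negative indices) there — outside Pre_.
def check_above (row : Int) (column : Int) (seating : List String) (width : Int) (height : Int) : Int :=
  if row = 0 then 0
  else if row < 0 then 0   -- totality guard, outside Pre_
  else
    match (PySem.List.pyGet? seating (row - 1)).bind (fun s => PySem.Str.pyGet? s column) with
    | none => 0            -- IndexError in Python, outside Pre_
    | some c =>
      if c = '#' then 1
      else if c = 'L' then 0
      else check_above (row - 1) column seating width height
termination_by row.toNat
decreasing_by omega

-- ===== PORT B =====
-- the loop body of Source B, recursing on the (already materialised) list of row indices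
def scanUp (rs : List Int) (column : Int) (seating : List String) : Int :=
  match rs with
  | [] => 0
  | r :: rest =>
    match (PySem.List.pyGet? seating r).bind (fun s => PySem.Str.pyGet? s column) with
    | none => 0            -- IndexError in Python, outside Pre_
    | some seat =>
      if seat = '#' then 1
      else if seat = 'L' then 0
      else scanUp rest column seating

def check_above_alt (row : Int) (column : Int) (seating : List String) (width : Int) (height : Int) : Int :=
  scanUp (PySem.List.pyRange (row - 1) (-1) (-1)) column seating

-- ===== PRECONDITION & SPEC =====
-- Pre_ excludes inputs on which A raises (row above the grid or a column outside a scanned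
-- row, IndexError; an all-'.' scan from a negative row, RecursionError) and negative rows on
-- which A happens to return via Python's negative-index wraparound, an accident of A's
-- implementation on out-of-grid input; B's empty loop naturally returns 0 there.
def Pre_check_above (row : Int) (column : Int) (seating : List String) (width : Int) (height : Int) : Prop :=
  0 ≤ row ∧ row ≤ (seating.length : Int) ∧
  ∀ s ∈ seating.take row.toNat, PySem.Raise.InRange s.toList.length column
instance (row : Int) (column : Int) (seating : List String) (width : Int) (height : Int) : Decidable (Pre_check_above row column seating width height) := by unfold Pre_check_above; infer_instance

def pvWitness_check_above : Int × Int × List String × Int × Int := (1, 0, ["L"], 1, 1)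

def Spec_check_above (row : Int) (column : Int) (seating : List String) (width : Int) (height : Int) (out : Int) : Prop := out = check_above_alt row column seating width height
instance (row : Int) (column : Int) (seating : List String) (width : Int) (height : Int) (out : Int) : Decidable (Spec_check_above row column seating width height out) := by unfold Spec_check_above; infer_instance

-- ===== CLAIM (what is proved, stated in full; the proofs are below) =====
def Claim_equal_check_above : Prop := ∀ (row : Int) (column : Int) (seating : List String) (width : Int) (height : Int), Dom_check_above row column seating width height → Pre_check_above row column seating width height → Spec_check_above row column seating width height (check_above row column seating width height)

-- ===== LEMMAS AND PROOFS =====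

-- A's recursion equals B's scan of the countdown range, for every nonnegative row
-- (the index-validity part of Pre_ is not needed: both ports return 0 on a failed lookup).
theorem check_above_eq_scanUp (n : Nat) (row : Int) (hrow : row.toNat = n) (h0 : 0 ≤ row)
    (column : Int) (seating : List String) (width height : Int) :
    check_above row column seating width height
      = scanUp (PySem.List.pyRange (row - 1) (-1) (-1)) column seating := by
  induction n generalizing row with
  | zero =>
    have hz : row = 0 := by omega
    subst hz
    rw [PySem.List.pyRange_neg_one_eq_nil (by norm_num)]
    simp [check_above, scanUp]
  | succ k ih =>
    have hpos : 0 < row := by omega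
    rw [PySem.List.pyRange_neg_one_cons (by omega : (-1 : Int) < row - 1)]
    rw [check_above]
    simp only [scanUp]
    have hne : ¬ row = 0 := by omega
    have hnneg : ¬ row < 0 := by omega
    simp only [if_neg hne, if_neg hnneg]
    cases h : (PySem.List.pyGet? seating (row - 1)).bind (fun s => PySem.Str.pyGet? s column) with
    | none => rfl
    | some c =>
      by_cases h1 : c = '#'
      · simp [h1]
      · by_cases h2 : c = 'L'
        · simp [h2]
        · simp only [if_neg h1, if_neg h2]
          have := ih (row - 1) (by omega) (by omega)
          simpa [sub_sub] using this

-- ===== VERDICT (by name: the statement is the Claim_ definition above) =====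
theorem check_above_spec : Claim_equal_check_above := by
  intro row column seating width height _ hpre
  unfold Spec_check_above check_above_alt
  exact check_above_eq_scanUp row.toNat row rfl hpre.1 column seating width height
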